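-- pv_equiv track=rewrite | github.com/zigmoo/distributed_intent_ledger | _shared/scripts/lib/dil_search.py | _resolve_scope_patterns
-- ===== SOURCE A (Python) =====
-- SCOPE_DIRS = {
--     "memory": ["__machine__/*/"],
--     "memory_shared": ["_shared/_meta/", "_shared/preferences/", "_shared/policies/",
--                        "_shared/rules/", "_shared/lessons/"],
--     "tasks": ["_shared/domains/*/tasks/"],
--     "preferences": ["_shared/preferences/", "_shared/policies/", "_shared/rules/"],
--     "recall": [],
-- }
--
-- def _resolve_scope_patterns(scope, machine):
--     """Return list of directory patterns for a scope, resolving __machine__."""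
--     patterns = list(SCOPE_DIRS.get(scope, []))
--     # For memory scope, also include shared memory dirs
--     if scope == "memory":
--         patterns.extend(SCOPE_DIRS.get("memory_shared", []))
--     # Recall scope: memory + shared memory + tasks + preferences
--     if scope == "recall":
--         patterns.extend(SCOPE_DIRS.get("memory", []))
--         patterns.extend(SCOPE_DIRS.get("memory_shared", []))
--         patterns.extend(SCOPE_DIRS.get("tasks", []))
--         patterns.extend(SCOPE_DIRS.get("preferences", []))
--     resolved = []
--     for p in patterns:
--         if "__machine__" in p:
--             if machine:
--                 resolved.append(p.replace("__machine__", machine))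
--         else:
--             resolved.append(p)
--     return resolved
-- ===== SOURCE B (Python) =====
-- SCOPE_DIRS = {
--     "memory": ["__machine__/*/"],
--     "memory_shared": ["_shared/_meta/", "_shared/preferences/", "_shared/policies/",
--                        "_shared/rules/", "_shared/lessons/"],
--     "tasks": ["_shared/domains/*/tasks/"],
--     "preferences": ["_shared/preferences/", "_shared/policies/", "_shared/rules/"],
--     "recall": [],
-- }
--
-- # Fully materialized answers: scope -> (machine templates, static patterns), precomputed
-- # once at import time.  Correct because in every scope's composed list the (unique)
-- # "__machine__" pattern precedes all static ones, so the final answer is always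
-- # "substituted templates (when machine is truthy) followed by the static tail".
-- _RESOLVED = {
--     "memory": (["__machine__/*/"],
--                ["_shared/_meta/", "_shared/preferences/", "_shared/policies/",
--                 "_shared/rules/", "_shared/lessons/"]),
--     "memory_shared": ([], ["_shared/_meta/", "_shared/preferences/", "_shared/policies/",
--                            "_shared/rules/", "_shared/lessons/"]),
--     "tasks": ([], ["_shared/domains/*/tasks/"]),
--     "preferences": ([], ["_shared/preferences/", "_shared/policies/", "_shared/rules/"]),
--     "recall": (["__machine__/*/"],
--                ["_shared/_meta/", "_shared/preferences/", "_shared/policies/",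
--                 "_shared/rules/", "_shared/lessons/",
--                 "_shared/domains/*/tasks/",
--                 "_shared/preferences/", "_shared/policies/", "_shared/rules/"]),
-- }
--
-- def _resolve_scope_patterns(scope, machine):
--     """Return list of directory patterns for a scope, resolving __machine__."""
--     templates, static = _RESOLVED.get(scope, ([], []))
--     if not machine:
--         return list(static)
--     return [t.replace("__machine__", machine) for t in templates] + static
-- ===== Notes on version B (the rewrite author's own statement) =====
-- stated objective: alternative
-- what changed: B replaces A's runtime list composition plus per-pattern '__machine__' substring scan with a fully materialized module-level table mapping each scope directly to its precomputed (machine-template, static-pattern) answer pair; at call time it only substitutes the templates and appends the static tail, doing no composition and no substring search.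
import Mathlib
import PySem

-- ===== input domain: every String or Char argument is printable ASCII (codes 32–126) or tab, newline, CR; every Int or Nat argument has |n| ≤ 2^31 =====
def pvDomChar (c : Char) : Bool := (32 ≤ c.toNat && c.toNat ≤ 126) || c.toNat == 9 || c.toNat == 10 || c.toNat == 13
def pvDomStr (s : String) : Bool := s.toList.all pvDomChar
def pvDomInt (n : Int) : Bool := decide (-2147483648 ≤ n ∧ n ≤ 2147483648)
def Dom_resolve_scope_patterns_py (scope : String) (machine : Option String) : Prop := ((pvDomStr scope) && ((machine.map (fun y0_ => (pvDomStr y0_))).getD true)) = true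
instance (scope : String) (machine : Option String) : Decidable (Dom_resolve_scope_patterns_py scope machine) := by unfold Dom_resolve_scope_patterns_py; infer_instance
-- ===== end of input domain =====

-- B replaces A's runtime list composition + per-pattern substring scan with a fully
-- materialized table: scope -> precomputed (machine templates, static patterns)
-- (objective: alternative data structure, same cost).

-- ===== PORT A =====
-- module-level dict SCOPE_DIRS (A's context)
def SCOPE_DIRS : PySem.Dict String (List String) := PySem.Dict.mk
  [("memory", ["__machine__/*/"]),
   ("memory_shared", ["_shared/_meta/", "_shared/preferences/", "_shared/policies/",
                      "_shared/rules/", "_shared/lessons/"]),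
   ("tasks", ["_shared/domains/*/tasks/"]),
   ("preferences", ["_shared/preferences/", "_shared/policies/", "_shared/rules/"]),
   ("recall", [])]

def resolve_scope_patterns_py (scope : String) (machine : Option String) : List String :=
  let patterns := SCOPE_DIRS.getD scope []
  let patterns := if scope = "memory" then patterns ++ SCOPE_DIRS.getD "memory_shared" [] else patterns
  let patterns := if scope = "recall" then
      patterns ++ SCOPE_DIRS.getD "memory" [] ++ SCOPE_DIRS.getD "memory_shared" []
        ++ SCOPE_DIRS.getD "tasks" [] ++ SCOPE_DIRS.getD "preferences" []
    else patterns
  patterns.foldl (fun resolved p =>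
    if PySem.Str.isIn "__machine__" p then
      match machine with                                   -- 'if machine:' (None / "" are falsy)
      | some m => if m = "" then resolved else resolved ++ [PySem.Str.replace p "__machine__" m]
      | none => resolved
    else resolved ++ [p]) []

-- ===== PORT B =====
-- module-level materialized answer table _RESOLVED
def RESOLVED : PySem.Dict String (List String × List String) := PySem.Dict.mk
  [("memory", (["__machine__/*/"],
               ["_shared/_meta/", "_shared/preferences/", "_shared/policies/",
                "_shared/rules/", "_shared/lessons/"])),
   ("memory_shared", ([], ["_shared/_meta/", "_shared/preferences/", "_shared/policies/",
                           "_shared/rules/", "_shared/lessons/"])),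
   ("tasks", ([], ["_shared/domains/*/tasks/"])),
   ("preferences", ([], ["_shared/preferences/", "_shared/policies/", "_shared/rules/"])),
   ("recall", (["__machine__/*/"],
               ["_shared/_meta/", "_shared/preferences/", "_shared/policies/",
                "_shared/rules/", "_shared/lessons/",
                "_shared/domains/*/tasks/",
                "_shared/preferences/", "_shared/policies/", "_shared/rules/"]))]

def resolve_scope_patterns_py_alt (scope : String) (machine : Option String) : List String :=
  let ts := RESOLVED.getD scope ([], [])
  match machine with                                       -- 'if not machine: return list(static)'
  | none => ts.2
  | some m =>
    if m = "" then ts.2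
    else ts.1.map (fun t => PySem.Str.replace t "__machine__" m) ++ ts.2

-- ===== PRECONDITION & SPEC =====
def Spec_resolve_scope_patterns_py (scope : String) (machine : Option String) (out : List String) : Prop := out = resolve_scope_patterns_py_alt scope machine
instance (scope : String) (machine : Option String) (out : List String) : Decidable (Spec_resolve_scope_patterns_py scope machine out) := by unfold Spec_resolve_scope_patterns_py; infer_instance

-- ===== CLAIM (what is proved, stated in full; the proofs are below) =====
def Claim_equal_resolve_scope_patterns_py : Prop := ∀ (scope : String) (machine : Option String), Dom_resolve_scope_patterns_py scope machine → Spec_resolve_scope_patterns_py scope machine (resolve_scope_patterns_py scope machine)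

-- ===== LEMMAS AND PROOFS =====

-- A's accumulator loop equals a filterMap over the same pattern list.
theorem loop_eq_filterMap (machine : Option String) (ps acc : List String) :
    ps.foldl (fun resolved p =>
      if PySem.Str.isIn "__machine__" p then
        match machine with
        | some m => if m = "" then resolved else resolved ++ [PySem.Str.replace p "__machine__" m]
        | none => resolved
      else resolved ++ [p]) acc
    = acc ++ ps.filterMap (fun p =>
        if PySem.Str.isIn "__machine__" p then
          match machine with
          | some m => if m = "" then none else some (PySem.Str.replace p "__machine__" m)
          | none => none
        else some p) := by
  induction ps generalizing acc with
  | nil => simp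
  | cons p ps ih =>
    simp only [List.foldl_cons, List.filterMap_cons]
    rw [ih]
    cases hin : PySem.Str.isIn "__machine__" p <;>
      cases machine with
      | none => simp
      | some m => by_cases hm : m = "" <;> simp [hm]

-- A's filter/substitute pass keeps a placeholder-free list unchanged.
theorem filterMap_static (machine : Option String) (ps : List String)
    (h : ∀ p ∈ ps, PySem.Str.isIn "__machine__" p = false) :
    ps.filterMap (fun p =>
        if PySem.Str.isIn "__machine__" p then
          match machine with
          | some m => if m = "" then none else some (PySem.Str.replace p "__machine__" m)
          | none => none
        else some p) = ps := by
  induction ps with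
  | nil => rfl
  | cons p ps ih =>
    simp only [List.filterMap_cons, h p (List.mem_cons_self ..), Bool.false_eq_true, if_false]
    exact congrArg (p :: ·) (ih fun q hq => h q (List.mem_cons_of_mem _ hq))

-- For a scope that is none of the five known keys, both lookups miss.
theorem getD_miss (scope : String) (h1 : scope ≠ "memory") (h2 : scope ≠ "memory_shared")
    (h3 : scope ≠ "tasks") (h4 : scope ≠ "preferences") (h5 : scope ≠ "recall") :
    SCOPE_DIRS.getD scope [] = [] ∧ RESOLVED.getD scope ([], []) = ([], []) := by
  refine ⟨?_, ?_⟩ <;>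
  · simp only [SCOPE_DIRS, RESOLVED, PySem.Dict.getD_eq_get?_getD, PySem.Dict.get?_mk_cons,
      show ("memory" == scope) = false by simp [Ne.symm h1],
      show ("memory_shared" == scope) = false by simp [Ne.symm h2],
      show ("tasks" == scope) = false by simp [Ne.symm h3],
      show ("preferences" == scope) = false by simp [Ne.symm h4],
      show ("recall" == scope) = false by simp [Ne.symm h5],
      Bool.false_eq_true, if_false]
    rfl

-- ===== VERDICT (by name: the statement is the Claim_ definition above) =====
theorem resolve_scope_patterns_py_spec : Claim_equal_resolve_scope_patterns_py := by
  intro scope machine _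
  unfold Spec_resolve_scope_patterns_py resolve_scope_patterns_py resolve_scope_patterns_py_alt
  rw [loop_eq_filterMap]
  by_cases h1 : scope = "memory"
  · subst h1
    cases machine with
    | none => decide
    | some m =>
      by_cases hm : m = ""
      · subst hm; decide
      · simp only [if_neg (by decide : ¬("memory" : String) = "recall"),
          show SCOPE_DIRS.getD "memory" [] = ["__machine__/*/"] from by decide,
          show SCOPE_DIRS.getD "memory_shared" [] =
            ["_shared/_meta/", "_shared/preferences/", "_shared/policies/",
             "_shared/rules/", "_shared/lessons/"] from by decide,
          show RESOLVED.getD "memory" ([], []) = (["__machine__/*/"],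
            ["_shared/_meta/", "_shared/preferences/", "_shared/policies/",
             "_shared/rules/", "_shared/lessons/"]) from by decide,
          List.nil_append, List.cons_append, List.filterMap_cons,
          show PySem.Str.isIn "__machine__" "__machine__/*/" = true from by decide,
          if_true, if_neg hm, List.map_cons, List.map_nil]
        rfl
  · by_cases h5 : scope = "recall"
    · subst h5
      cases machine with
      | none => decide
      | some m =>
        by_cases hm : m = ""
        · subst hm; decide
        · simp only [if_neg (by decide : ¬("recall" : String) = "memory"),
            show SCOPE_DIRS.getD "recall" [] = [] from by decide,
            show SCOPE_DIRS.getD "memory" [] = ["__machine__/*/"] from by decide,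
            show SCOPE_DIRS.getD "memory_shared" [] =
              ["_shared/_meta/", "_shared/preferences/", "_shared/policies/",
               "_shared/rules/", "_shared/lessons/"] from by decide,
            show SCOPE_DIRS.getD "tasks" [] = ["_shared/domains/*/tasks/"] from by decide,
            show SCOPE_DIRS.getD "preferences" [] =
              ["_shared/preferences/", "_shared/policies/", "_shared/rules/"] from by decide,
            show RESOLVED.getD "recall" ([], []) = (["__machine__/*/"],
              ["_shared/_meta/", "_shared/preferences/", "_shared/policies/",
               "_shared/rules/", "_shared/lessons/",
               "_shared/domains/*/tasks/",
               "_shared/preferences/", "_shared/policies/", "_shared/rules/"]) from by decide,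
            List.nil_append, List.cons_append, List.filterMap_cons,
            show PySem.Str.isIn "__machine__" "__machine__/*/" = true from by decide,
            if_true, if_neg hm, List.map_cons, List.map_nil]
          rfl
    · by_cases h2 : scope = "memory_shared"
      · subst h2
        simp only [if_neg (by decide : ¬("memory_shared" : String) = "memory"),
          if_neg (by decide : ¬("memory_shared" : String) = "recall"), List.nil_append,
          show SCOPE_DIRS.getD "memory_shared" [] = ["_shared/_meta/", "_shared/preferences/", "_shared/policies/", "_shared/rules/", "_shared/lessons/"] from by decide,
          show RESOLVED.getD "memory_shared" ([], []) = (([] : List String), ["_shared/_meta/", "_shared/preferences/", "_shared/policies/", "_shared/rules/", "_shared/lessons/"]) from by decide,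
          filterMap_static machine ["_shared/_meta/", "_shared/preferences/", "_shared/policies/", "_shared/rules/", "_shared/lessons/"] (by decide)]
        cases machine with
        | none => rfl
        | some m => by_cases hm : m = "" <;> simp [hm]
      · by_cases h3 : scope = "tasks"
        · subst h3
          simp only [if_neg (by decide : ¬("tasks" : String) = "memory"),
            if_neg (by decide : ¬("tasks" : String) = "recall"), List.nil_append,
            show SCOPE_DIRS.getD "tasks" [] = ["_shared/domains/*/tasks/"] from by decide,
            show RESOLVED.getD "tasks" ([], []) = (([] : List String), ["_shared/domains/*/tasks/"]) from by decide,
            filterMap_static machine ["_shared/domains/*/tasks/"] (by decide)]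
          cases machine with
          | none => rfl
          | some m => by_cases hm : m = "" <;> simp [hm]
        · by_cases h4 : scope = "preferences"
          · subst h4
            simp only [if_neg (by decide : ¬("preferences" : String) = "memory"),
              if_neg (by decide : ¬("preferences" : String) = "recall"), List.nil_append,
              show SCOPE_DIRS.getD "preferences" [] = ["_shared/preferences/", "_shared/policies/", "_shared/rules/"] from by decide,
              show RESOLVED.getD "preferences" ([], []) = (([] : List String), ["_shared/preferences/", "_shared/policies/", "_shared/rules/"]) from by decide,
              filterMap_static machine ["_shared/preferences/", "_shared/policies/", "_shared/rules/"] (by decide)]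
            cases machine with
            | none => rfl
            | some m => by_cases hm : m = "" <;> simp [hm]
          · obtain ⟨hA, hB⟩ := getD_miss scope h1 h2 h3 h4 h5
            simp only [if_neg h1, if_neg h5, hA, hB, List.filterMap_nil, List.nil_append]
            cases machine with
            | none => rfl
            | some m => by_cases hm : m = "" <;> simp [hm]
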